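-- pv_equiv track=rewrite | github.com/DadoIrie/ComfyUI_Dados_Nodes | nodes/DN_WildcardPromptEditorNode.py | _find_wildcard_matches
-- ===== SOURCE A (Python) =====
-- def _find_wildcard_matches(clean_prompt: str) -> list:
--     matches = []
--     i = 0
--     while i < len(clean_prompt):
--         if clean_prompt[i] == '{':
--             start = i
--             brace_count = 1
--             i += 1
--
--             while i < len(clean_prompt) and brace_count > 0:
--                 if clean_prompt[i] == '{':
--                     brace_count += 1
--                 elif clean_prompt[i] == '}':
--                     brace_count -= 1
--                 i += 1
--
--             if brace_count == 0:
--                 end = i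
--                 content = clean_prompt[start + 1:end - 1]
--                 matches.append((start, end, content))
--             else:
--                 break
--         else:
--             i += 1
--
--     return matches
-- ===== SOURCE B (Python) =====
-- def _find_wildcard_matches(clean_prompt: str) -> list:
--     matches = []
--     stack = []
--     for i, ch in enumerate(clean_prompt):
--         if ch == '{':
--             stack.append(i)
--         elif ch == '}':
--             if stack:
--                 start = stack.pop()
--                 if not stack:
--                     matches.append((start, i + 1, clean_prompt[start + 1:i]))
--     return matches
-- ===== Notes on version B (the rewrite author's own statement) =====
-- stated objective: idiomatic
-- what changed: Replaced the nested while-loops (outer index scan plus inner brace-depth re-scan per group) by a single flat enumerate pass maintaining a stack of open-brace start indices, recording a match exactly when the stack empties.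
import Mathlib
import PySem

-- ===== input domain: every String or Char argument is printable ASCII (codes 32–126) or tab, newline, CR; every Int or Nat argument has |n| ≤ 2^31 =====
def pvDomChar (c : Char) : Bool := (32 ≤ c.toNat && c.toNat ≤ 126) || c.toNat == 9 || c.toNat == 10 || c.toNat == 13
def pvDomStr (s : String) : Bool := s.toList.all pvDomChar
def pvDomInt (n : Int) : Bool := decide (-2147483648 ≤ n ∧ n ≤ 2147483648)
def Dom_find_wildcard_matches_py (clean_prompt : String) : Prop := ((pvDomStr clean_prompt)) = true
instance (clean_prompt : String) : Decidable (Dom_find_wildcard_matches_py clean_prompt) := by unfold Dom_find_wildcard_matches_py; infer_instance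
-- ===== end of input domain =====

-- B replaces A's nested while-loops (outer index scan + inner brace-depth re-scan) by one
-- flat pass over the characters with a stack of open-brace start indices (idiomatic; same cost).

-- ===== PORT A =====
-- A's inner brace_count update for one character.
def pvStep (c : Char) (d : Nat) : Nat :=
  if c = '{' then d + 1 else if c = '}' then d - 1 else d

-- A's inner while-loop: walks the suffix `cs` (whose head is character number `i` of the
-- string) with brace_count `d`; returns the end index together with the suffix that remains
-- after it, or none when the string runs out with brace_count still positive.
def pvAInner : List Char → Nat → Nat → Option (Nat × List Char)
  | [], _, _ => none
  | c :: rest, i, d =>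
      if pvStep c d = 0 then some (i + 1, rest) else pvAInner rest (i + 1) (pvStep c d)

theorem pvAInner_length_lt : ∀ (cs : List Char) (i d e : Nat) (rest' : List Char),
    pvAInner cs i d = some (e, rest') → rest'.length < cs.length := by
  intro cs
  induction cs with
  | nil => intro i d e rest' h; simp [pvAInner] at h
  | cons c rest ih =>
      intro i d e rest' h
      rw [pvAInner] at h
      by_cases hd : pvStep c d = 0
      · rw [if_pos hd] at h
        injection h with h'
        injection h' with h1 h2
        subst h2; simp
      · rw [if_neg hd] at h
        exact Nat.lt_succ_of_lt (ih (i + 1) _ e rest' h)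

-- A's outer while-loop over the suffix starting at index `i`, accumulating `matches`.
def pvAOuter (s : String) : List Char → Nat → List (Int × Int × String) → List (Int × Int × String)
  | [], _, acc => acc
  | c :: rest, i, acc =>
      if c = '{' then
        match h : pvAInner rest (i + 1) 1 with
        | some (e, rest') =>
            pvAOuter s rest' e
              (acc ++ [((i : Int), (e : Int), PySem.Str.slice s (some ((i : Int) + 1)) (some ((e : Int) - 1)))])
        | none => acc
      else
        pvAOuter s rest (i + 1) acc
  termination_by cs => cs.length
  decreasing_by
    · exact Nat.lt_succ_of_lt (pvAInner_length_lt _ _ _ _ _ h)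
    · simp

def find_wildcard_matches_py (clean_prompt : String) : List (Int × Int × String) :=
  pvAOuter clean_prompt clean_prompt.toList 0 []

-- ===== PORT B =====
-- B's single for-loop: `st` is the stack of open-brace start indices; a match is recorded
-- exactly when a pop leaves the stack empty.
def pvBLoop (s : String) : List Char → Nat → List Nat → List (Int × Int × String) → List (Int × Int × String)
  | [], _, _, acc => acc
  | c :: rest, i, st, acc =>
      if c = '{' then pvBLoop s rest (i + 1) (i :: st) acc
      else if c = '}' then
        match st with
        | [] => pvBLoop s rest (i + 1) [] acc
        | start :: st' =>
            if st' = [] then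
              pvBLoop s rest (i + 1) []
                (acc ++ [((start : Int), ((i : Int) + 1), PySem.Str.slice s (some ((start : Int) + 1)) (some (i : Int)))])
            else pvBLoop s rest (i + 1) st' acc
      else pvBLoop s rest (i + 1) st acc

def find_wildcard_matches_py_alt (clean_prompt : String) : List (Int × Int × String) :=
  pvBLoop clean_prompt clean_prompt.toList 0 [] []

-- ===== PRECONDITION & SPEC =====
def Spec_find_wildcard_matches_py (clean_prompt : String) (out : List (Int × Int × String)) : Prop := out = find_wildcard_matches_py_alt clean_prompt
instance (clean_prompt : String) (out : List (Int × Int × String)) : Decidable (Spec_find_wildcard_matches_py clean_prompt out) := by unfold Spec_find_wildcard_matches_py; infer_instance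

-- ===== CLAIM (what is proved, stated in full; the proofs are below) =====
def Claim_equal_find_wildcard_matches_py : Prop := ∀ (clean_prompt : String), Dom_find_wildcard_matches_py clean_prompt → Spec_find_wildcard_matches_py clean_prompt (find_wildcard_matches_py clean_prompt)

-- ===== LEMMAS AND PROOFS =====

-- While a group is open, B's stack plays the role of A's brace_count: its length is the
-- count, its bottom element is the start index of the pending top-level group, and nothing
-- is recorded until the stack empties (= brace_count reaches 0).
theorem pvInner_corr (s : String) : ∀ (cs : List Char) (i : Nat) (st : List Nat)
    (acc : List (Int × Int × String)) (hne : st ≠ []),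
    pvBLoop s cs i st acc =
      match pvAInner cs i st.length with
      | none => acc
      | some (e, rest') =>
          pvBLoop s rest' e []
            (acc ++ [((st.getLast hne : Int), (e : Int),
              PySem.Str.slice s (some ((st.getLast hne : Int) + 1)) (some ((e : Int) - 1)))])
  := by
  intro cs
  induction cs with
  | nil => intro i st acc hne; simp [pvBLoop, pvAInner]
  | cons c rest ih =>
      intro i st acc hne
      obtain ⟨b, st', rfl⟩ : ∃ b st', st = b :: st' := by
        cases st with
        | nil => exact absurd rfl hne
        | cons b st' => exact ⟨b, st', rfl⟩
      by_cases hob : c = '{'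
      · -- push: depth grows by one, bottom unchanged
        subst hob
        have hne' : (i :: b :: st') ≠ [] := by simp
        rw [pvBLoop.eq_3, pvAInner]
        rw [if_pos rfl]
        rw [show pvStep '{' (b :: st').length = (i :: b :: st').length from by simp [pvStep]]
        rw [if_neg (by simp)]
        rw [ih (i + 1) (i :: b :: st') acc hne']
        rw [List.getLast_cons hne]
      · by_cases hcb : c = '}'
        · -- pop
          subst hcb
          rw [pvBLoop.eq_3, pvAInner]
          rw [if_neg (by decide)]
          rw [if_pos rfl]
          rw [show pvStep '}' (b :: st').length = st'.length from by simp [pvStep]]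
          by_cases hst' : st' = []
          · -- stack empties: both record the same match (end index e = i + 1)
            subst hst'
            rw [if_pos rfl]
            simp [List.getLast_singleton]
          · rw [if_neg hst']
            rw [if_neg (by simpa [List.length_eq_zero_iff] using hst')]
            rw [ih (i + 1) st' acc hst', List.getLast_cons hst']
        · -- other character: both skip
          rw [pvBLoop.eq_3, pvAInner]
          rw [if_neg hob, if_neg hcb]
          rw [show pvStep c (b :: st').length = (b :: st').length from by simp [pvStep, hob, hcb]]
          rw [if_neg (by simp)]
          rw [ih (i + 1) (b :: st') acc hne]

-- A's outer loop equals B's loop run with an empty stack (strong induction on the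
-- length of the remaining suffix, since A's outer loop jumps past each group).
theorem pvOuter_corr_bounded (s : String) : ∀ (n : Nat) (cs : List Char), cs.length ≤ n →
    ∀ (i : Nat) (acc : List (Int × Int × String)),
      pvAOuter s cs i acc = pvBLoop s cs i [] acc := by
  intro n
  induction n with
  | zero =>
      intro cs hlen i acc
      have : cs = [] := List.length_eq_zero_iff.mp (Nat.le_zero.mp hlen)
      subst this
      simp [pvAOuter, pvBLoop]
  | succ n ih =>
      intro cs hlen i acc
      cases cs with
      | nil => simp [pvAOuter, pvBLoop]
      | cons c rest =>
          by_cases hob : c = '{'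
          · subst hob
            rw [pvAOuter, pvBLoop]
            rw [if_pos rfl, if_pos rfl]
            have hcorr := pvInner_corr s rest (i + 1) [i] acc (by simp)
            simp only [List.length_cons, List.length_nil, List.getLast_singleton] at hcorr
            rw [hcorr]
            cases h : pvAInner rest (i + 1) 1 with
            | none => simp
            | some p =>
                obtain ⟨e, rest'⟩ := p
                simp only
                have hlt : rest'.length ≤ n := by
                  have := pvAInner_length_lt rest (i + 1) 1 e rest' h
                  simp at hlen
                  omega
                exact ih rest' hlt e _
          · by_cases hcb : c = '}'
            · subst hcb
              rw [pvAOuter, pvBLoop]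
              rw [if_neg (by decide), if_neg (by decide), if_pos rfl]
              exact ih rest (by simpa using Nat.le_of_succ_le_succ (by simpa using hlen)) (i + 1) acc
            · rw [pvAOuter, pvBLoop]
              rw [if_neg hob, if_neg hob, if_neg hcb]
              exact ih rest (by simpa using Nat.le_of_succ_le_succ (by simpa using hlen)) (i + 1) acc

-- ===== VERDICT (by name: the statement is the Claim_ definition above) =====
theorem find_wildcard_matches_py_spec : Claim_equal_find_wildcard_matches_py := by
  intro s _
  unfold Spec_find_wildcard_matches_py find_wildcard_matches_py find_wildcard_matches_py_alt
  exact pvOuter_corr_bounded s s.toList.length s.toList (le_refl _) 0 []
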